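-- pv_equiv track=rewrite | github.com/Litt1e-hamst3r/CipherCraft | backend/Key.py | get_affine_keys
-- ===== SOURCE A (Python) =====
-- from math import gcd
--
-- def get_affine_keys(seed):
--     b = seed % 26
--     a = (seed // 26) % 26
--     while gcd(a, 26) != 1:
--         a = (a + 1) % 26
--         if a == 0:
--             a += 1
--     return [str(a), str(b)]
-- ===== SOURCE B (Python) =====
-- from math import gcd
--
-- def get_affine_keys(seed):
--     valids = [x for x in range(1, 26) if gcd(x, 26) == 1]
--     b = seed % 26
--     start = (seed // 26) % 26
--     a = next((x for x in valids if x >= start), valids[0])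
--     return [str(a), str(b)]
-- ===== Notes on version B (the rewrite author's own statement) =====
-- stated objective: simpler
-- what changed: Replaces A's mutating increment-and-test while loop by building the fixed table of admissible affine multipliers once and selecting the first table entry at or above the start value (falling back to the table's first entry), a loop-free table-plus-selection decomposition.
import Mathlib
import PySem

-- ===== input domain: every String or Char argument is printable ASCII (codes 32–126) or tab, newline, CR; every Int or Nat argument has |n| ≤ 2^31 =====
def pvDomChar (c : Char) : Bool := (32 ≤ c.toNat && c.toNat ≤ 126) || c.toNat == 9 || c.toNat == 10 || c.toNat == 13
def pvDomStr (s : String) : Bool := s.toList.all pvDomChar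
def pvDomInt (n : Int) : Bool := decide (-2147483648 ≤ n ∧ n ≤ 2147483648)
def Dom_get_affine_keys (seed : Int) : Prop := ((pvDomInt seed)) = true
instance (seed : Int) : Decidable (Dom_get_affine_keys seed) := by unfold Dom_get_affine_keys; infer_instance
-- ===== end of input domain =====

-- B replaces A's mutating increment-and-test while loop by a precomputed table of
-- admissible multipliers and a single selection pass (objective: simpler decomposition).


-- ===== PORT A =====
-- A's while loop: it runs at most 26 iterations (25 is coprime with 26), so a fuel of 26
-- makes the same computation total without changing any iteration.
def pvALoop : Int → Nat → Int
  | a, 0 => a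
  | a, fuel + 1 =>
    if Int.gcd a 26 ≠ 1 then
      let a1 := PySem.Int.mod (a + 1) 26
      let a2 := if a1 = 0 then a1 + 1 else a1
      pvALoop a2 fuel
    else a

def get_affine_keys (seed : Int) : List String :=
  let b := PySem.Int.mod seed 26
  let a := PySem.Int.mod (PySem.Int.floordiv seed 26) 26
  let a := pvALoop a 26
  [PySem.Int.toStr a, PySem.Int.toStr b]

-- ===== PORT B =====
def pvValids : List Int :=
  (PySem.List.pyRange 1 26 1).filter (fun x => Int.gcd x 26 == 1)

def get_affine_keys_alt (seed : Int) : List String :=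
  let valids := pvValids
  let b := PySem.Int.mod seed 26
  let start := PySem.Int.mod (PySem.Int.floordiv seed 26) 26
  let a := (valids.find? (fun x => start ≤ x)).getD ((PySem.List.pyGet? valids 0).getD 0)
  [PySem.Int.toStr a, PySem.Int.toStr b]

-- ===== PRECONDITION & SPEC =====
def Spec_get_affine_keys (seed : Int) (out : List String) : Prop := out = get_affine_keys_alt seed
instance (seed : Int) (out : List String) : Decidable (Spec_get_affine_keys seed out) := by unfold Spec_get_affine_keys; infer_instance

-- ===== CLAIM (what is proved, stated in full; the proofs are below) =====
def Claim_equal_get_affine_keys : Prop := ∀ (seed : Int), Dom_get_affine_keys seed → Spec_get_affine_keys seed (get_affine_keys seed)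

-- ===== LEMMAS AND PROOFS =====
-- Both programs select a as a function of start = (seed // 26) % 26 ∈ [0, 26); the two
-- selections agree on each of the 26 possible values.
theorem pv_agree_on_start : ∀ n : Nat, n < 26 →
    pvALoop (n : Int) 26 =
      ((pvValids.find? (fun x => (n : Int) ≤ x)).getD ((PySem.List.pyGet? pvValids 0).getD 0)) := by
  decide

theorem get_affine_keys_spec : Claim_equal_get_affine_keys := by
  intro seed _
  show get_affine_keys seed = get_affine_keys_alt seed
  unfold get_affine_keys get_affine_keys_alt
  have h0 : (0:Int) ≤ PySem.Int.mod (PySem.Int.floordiv seed 26) 26 :=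
    PySem.Int.mod_nonneg _ (by norm_num)
  have h26 : PySem.Int.mod (PySem.Int.floordiv seed 26) 26 < 26 :=
    PySem.Int.mod_lt _ (by norm_num)
  set s := PySem.Int.mod (PySem.Int.floordiv seed 26) 26 with hs
  obtain ⟨n, hn⟩ : ∃ n : Nat, s = (n : Int) := ⟨s.toNat, by omega⟩
  have hlt : n < 26 := by omega
  rw [hn]
  simp only [pv_agree_on_start n hlt]
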